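-- pv_equiv track=rewrite | github.com/Ace1928/eidosian_forge | archive_forge/code/class__GeneralizerDecombinerCommandsMap.py | hlineto
-- ===== SOURCE A (Python) =====
-- def hlineto(args):
--     if not args:
--         raise ValueError(args)
--     it = iter(args)
--     try:
--         while True:
--             yield ('rlineto', [next(it), 0])
--             yield ('rlineto', [0, next(it)])
--     except StopIteration:
--         pass
-- ===== SOURCE B (Python) =====
-- def hlineto(args):
--     if not args:
--         raise ValueError(args)
--     for i, a in enumerate(args):
--         yield ('rlineto', [a, 0] if i % 2 == 0 else [0, a])
-- ===== Notes on version B (the rewrite author's own statement) =====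
-- stated objective: simpler
-- what changed: Replaced the paired next()/try-except-StopIteration pulls on an explicit iterator with a single enumerate loop emitting [a,0] or [0,a] by index parity.
import Mathlib
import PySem

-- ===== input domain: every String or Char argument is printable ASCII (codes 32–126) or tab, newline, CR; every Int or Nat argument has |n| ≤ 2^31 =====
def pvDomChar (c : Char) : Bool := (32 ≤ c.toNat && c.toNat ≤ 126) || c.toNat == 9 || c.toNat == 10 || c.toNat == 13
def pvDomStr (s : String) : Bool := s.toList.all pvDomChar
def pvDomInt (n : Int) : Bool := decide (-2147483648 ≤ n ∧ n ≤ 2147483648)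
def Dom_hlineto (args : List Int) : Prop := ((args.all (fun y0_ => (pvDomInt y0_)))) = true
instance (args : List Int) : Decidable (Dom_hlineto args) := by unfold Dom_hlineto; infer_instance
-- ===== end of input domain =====

-- B replaces A's paired next()/StopIteration pulls with one enumerate loop keyed on index parity (objective: simpler).

-- ===== PORT A =====
-- A pulls two elements per loop iteration from the iterator; StopIteration ends the loop.
def hlineto (args : List Int) : List (String × List Int) :=
  match args with
  | [] => []
  | [a] => [("rlineto", [a, 0])]
  | a :: b :: rest => ("rlineto", [a, 0]) :: ("rlineto", [0, b]) :: hlineto rest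

-- ===== PORT B =====
def hlineto_alt (args : List Int) : List (String × List Int) :=
  (PySem.List.enumerate args).map
    (fun p => ("rlineto", if p.1 % 2 == 0 then [p.2, 0] else [0, p.2]))

-- ===== PRECONDITION & SPEC =====
-- A (as a consumed generator) raises ValueError on the empty list; B does the same, so [] is outside Pre_.
def Pre_hlineto (args : List Int) : Prop := args ≠ []
instance (args : List Int) : Decidable (Pre_hlineto args) := by unfold Pre_hlineto; infer_instance
def pvWitness_hlineto : List Int := ([3, 4, 5])
def Spec_hlineto (args : List Int) (out : List (String × List Int)) : Prop := out = hlineto_alt args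
instance (args : List Int) (out : List (String × List Int)) : Decidable (Spec_hlineto args out) := by unfold Spec_hlineto; infer_instance

-- ===== CLAIM (what is proved, stated in full; the proofs are below) =====
def Claim_equal_hlineto : Prop := ∀ (args : List Int), Dom_hlineto args → Pre_hlineto args → Spec_hlineto args (hlineto args)

-- ===== LEMMAS AND PROOFS =====
-- Loop invariant: mapping B's body over an enumeration starting at any even index s reproduces A's two-at-a-time recursion.
theorem hlineto_enum_even (args : List Int) :
    ∀ s : Int, s % 2 = 0 →
      (PySem.List.enumerate args s).map
        (fun p => (("rlineto", if p.1 % 2 == 0 then [p.2, 0] else [0, p.2]) : String × List Int))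
      = hlineto args := by
  induction args using hlineto.induct with
  | case1 => intro s _; simp [PySem.List.enumerate_nil, hlineto]
  | case2 a =>
      intro s hs
      simp [PySem.List.enumerate_cons, PySem.List.enumerate_nil, hlineto, hs]
  | case3 a b rest ih =>
      intro s hs
      have h1 : (s + 1) % 2 = 1 := by omega
      have h2 : (s + 1 + 1) % 2 = 0 := by omega
      rw [PySem.List.enumerate_cons, PySem.List.enumerate_cons, List.map_cons,
        List.map_cons, ih _ h2]
      simp [hlineto, hs, h1]

-- ===== VERDICT (by name: the statement is the Claim_ definition above) =====
theorem hlineto_spec : Claim_equal_hlineto := by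
  intro args _ _
  unfold Spec_hlineto hlineto_alt
  exact (hlineto_enum_even args 0 rfl).symm
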